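-- pv_equiv track=rewrite | github.com/sagrawal01/sequence_analysis | analyze_sequence.py | generateshippinglabel
-- ===== SOURCE A (Python) =====
-- def generateshippinglabel(input_sequence):
--     """
--         Reads the input sequence (string) and returns the number of each of the different parts of the sequence
--                 Assumptions:
--                 1. Any letter is allowed for the base (there is no error handling for the base)
--                    and d is the only sugar that refers to DNA.
--                 2. The input_sequence is not empty
--                 3. The input_sequence is one string of length 4N-1 (where N is the number of bases)
--                 Parameters:
--                         input_sequence (string): input string containing base-sugar units and linkages
--                 Returns:
--                         shipping label (string): formatted shipping label of the input_sequence
--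
--     """
--     bracket = False
--     shippinglabel = ''
--     for i in range(1,len(input_sequence),4):
--         if input_sequence[i+1] == 'd' and not bracket:
--             shippinglabel += '['+input_sequence[i]
--             bracket = True
--         elif input_sequence[i+1] != 'd' and bracket:
--             shippinglabel += ']' + input_sequence[i]
--             bracket = False
--         else:
--             shippinglabel += input_sequence[i]
--     #This is closing the bracket if bracket was not closed (i.e. no RNA in the sequence at the end)
--     if bracket:
--         shippinglabel += ']'
--     return shippinglabel
-- ===== SOURCE B (Python) =====
-- def generateshippinglabel(input_sequence):
--     bases = input_sequence[1::4]
--     flags = [c == 'd' for c in input_sequence[2::4]]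
--     n = len(flags)
--     out = []
--     for j, b in enumerate(bases):
--         out.append(('[' if flags[j] and (j == 0 or not flags[j - 1]) else '')
--                    + b
--                    + (']' if flags[j] and (j + 1 == n or not flags[j + 1]) else ''))
--     return ''.join(out)
-- ===== Notes on version B (the rewrite author's own statement) =====
-- stated objective: alternative
-- what changed: Replaces the stateful bracket-toggle loop over range(1,len,4) with extended-slice precomputation of bases and DNA flags plus a stateless per-position rule that opens/closes a bracket by comparing each flag with its neighbours.
import Mathlib
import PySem

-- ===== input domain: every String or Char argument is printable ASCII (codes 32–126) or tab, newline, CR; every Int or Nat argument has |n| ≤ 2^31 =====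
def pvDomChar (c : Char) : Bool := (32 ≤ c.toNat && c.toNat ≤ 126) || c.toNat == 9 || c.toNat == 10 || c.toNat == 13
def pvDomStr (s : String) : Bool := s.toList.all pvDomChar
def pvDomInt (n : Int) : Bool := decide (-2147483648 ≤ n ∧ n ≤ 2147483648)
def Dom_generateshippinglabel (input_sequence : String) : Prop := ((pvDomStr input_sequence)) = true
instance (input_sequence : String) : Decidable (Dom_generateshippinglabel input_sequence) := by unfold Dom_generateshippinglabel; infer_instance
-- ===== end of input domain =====

-- B replaces A's stateful bracket-toggle loop by slice precomputation plus a stateless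
-- neighbour-flag rule; equivalence is proved on all strings whose length is not 2 mod 4
-- (on those A raises IndexError).


-- ===== PORT A =====
-- Transliteration of A; the Python string is handled as its character list, string
-- concatenation as list append.  pyGetD's default is only reachable outside Pre_
-- (where the Python raises IndexError).
def generateshippinglabel (input_sequence : String) : String :=
  let cs := input_sequence.toList
  let st := (PySem.List.pyRange 1 (cs.length : Int) 4).foldl
    (fun (st : Bool × List Char) i =>
      if PySem.List.pyGetD cs (i + 1) ' ' = 'd' ∧ st.1 = false then
        (true, st.2 ++ ['['] ++ [PySem.List.pyGetD cs i ' '])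
      else if PySem.List.pyGetD cs (i + 1) ' ' ≠ 'd' ∧ st.1 = true then
        (false, st.2 ++ [']'] ++ [PySem.List.pyGetD cs i ' '])
      else
        (st.1, st.2 ++ [PySem.List.pyGetD cs i ' ']))
    (false, [])
  String.ofList (if st.1 then st.2 ++ [']'] else st.2)

-- ===== PORT B =====
-- Exact hand port of Python's extended slice l[0::4] (every fourth element).
def pvStep4 : List Char → List Char
  | [] => []
  | c :: rest => c :: pvStep4 (rest.drop 3)
termination_by l => l.length
decreasing_by simp

-- Transliteration of B (Source B): slices, flag list, one join over per-position chunks.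
def generateshippinglabel_alt (input_sequence : String) : String :=
  let bases := pvStep4 (input_sequence.toList.drop 1)
  let flags := (pvStep4 (input_sequence.toList.drop 2)).map (fun c => c == 'd')
  let n := flags.length
  let out := (PySem.List.enumerate bases).foldl
    (fun (out : List (List Char)) jb =>
      out ++ [(if PySem.List.pyGetD flags jb.1 false = true ∧
                  (jb.1 = 0 ∨ PySem.List.pyGetD flags (jb.1 - 1) false = false)
               then ['['] else []) ++
              [jb.2] ++
              (if PySem.List.pyGetD flags jb.1 false = true ∧
                  (jb.1 + 1 = (n : Int) ∨ PySem.List.pyGetD flags (jb.1 + 1) false = false)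
               then [']'] else [])])
    []
  String.ofList out.flatten

-- ===== PRECONDITION & SPEC =====
-- A raises IndexError (reading input_sequence[i+1] with i = len-1) exactly when the
-- length is ≡ 2 (mod 4); those inputs are excluded (B raises there as well).
def Pre_generateshippinglabel (input_sequence : String) : Prop :=
  input_sequence.toList.length % 4 ≠ 2
instance (input_sequence : String) : Decidable (Pre_generateshippinglabel input_sequence) := by
  unfold Pre_generateshippinglabel; infer_instance

def pvWitness_generateshippinglabel : String := "AAd"

def Spec_generateshippinglabel (input_sequence : String) (out : String) : Prop :=
  out = generateshippinglabel_alt input_sequence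
instance (input_sequence : String) (out : String) : Decidable (Spec_generateshippinglabel input_sequence out) := by
  unfold Spec_generateshippinglabel; infer_instance

-- ===== CLAIM (what is proved, stated in full; the proofs are below) =====
def Claim_equal_generateshippinglabel : Prop := ∀ (input_sequence : String), Dom_generateshippinglabel input_sequence → Pre_generateshippinglabel input_sequence → Spec_generateshippinglabel input_sequence (generateshippinglabel input_sequence)

-- ===== LEMMAS AND PROOFS =====

-- Proof-side helpers: A's loop body and final step as named functions (definitionally
-- the port's code), the common unit list, and two canonical emitters.
def pvAstep (cs : List Char) (st : Bool × List Char) (i : Int) : Bool × List Char :=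
  if PySem.List.pyGetD cs (i + 1) ' ' = 'd' ∧ st.1 = false then
    (true, st.2 ++ ['['] ++ [PySem.List.pyGetD cs i ' '])
  else if PySem.List.pyGetD cs (i + 1) ' ' ≠ 'd' ∧ st.1 = true then
    (false, st.2 ++ [']'] ++ [PySem.List.pyGetD cs i ' '])
  else
    (st.1, st.2 ++ [PySem.List.pyGetD cs i ' '])

def pvFinish (st : Bool × List Char) : List Char :=
  if st.1 then st.2 ++ [']'] else st.2

def pvUnits (cs : List Char) : List (Char × Bool) :=
  (pvStep4 (cs.drop 1)).zip ((pvStep4 (cs.drop 2)).map (fun c => c == 'd'))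

def pvHead : List (Char × Bool) → Bool
  | [] => false
  | (_, d) :: _ => d

-- A-style emitter: the closing bracket travels with the NEXT unit (or trails at the end).
def pvCanon : Bool → List (Char × Bool) → List Char
  | prev, [] => if prev then [']'] else []
  | prev, (b, d) :: us =>
      (if d = true ∧ prev = false then ['['] ++ [b]
       else if d = false ∧ prev = true then [']'] ++ [b]
       else [b]) ++ pvCanon d us

-- B-style emitter: the closing bracket travels with the LAST DNA unit of a run.
def pvCanon2 : Bool → List (Char × Bool) → List Char
  | _, [] => []
  | prev, (b, d) :: us =>
      (if d = true ∧ prev = false then ['['] else []) ++ [b] ++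
      (if d = true ∧ pvHead us = false then [']'] else []) ++ pvCanon2 d us

-- B's per-position chunk (the element appended to `out` in each iteration).
def pvBchunk (flags : List Bool) (jb : Int × Char) : List Char :=
  (if PySem.List.pyGetD flags jb.1 false = true ∧
      (jb.1 = 0 ∨ PySem.List.pyGetD flags (jb.1 - 1) false = false)
   then ['['] else []) ++
  [jb.2] ++
  (if PySem.List.pyGetD flags jb.1 false = true ∧
      (jb.1 + 1 = (flags.length : Int) ∨ PySem.List.pyGetD flags (jb.1 + 1) false = false)
   then [']'] else [])

theorem pvRange4_nil (a b : Int) (h : b ≤ a) : PySem.List.pyRange a b 4 = [] := by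
  rw [PySem.List.pyRange_of_pos _ _ (by norm_num), if_neg (by omega)]
  simp

theorem pvRange4_cons (a b : Int) (h : a < b) :
    PySem.List.pyRange a b 4 = a :: PySem.List.pyRange (a + 4) b 4 := by
  rw [PySem.List.pyRange_of_pos _ _ (by norm_num),
      PySem.List.pyRange_of_pos (a + 4) b (by norm_num), if_pos h]
  by_cases h2 : a + 4 < b
  · rw [if_pos h2]
    have hc : ((b - a + 4 - 1) / 4).toNat = ((b - (a + 4) + 4 - 1) / 4).toNat + 1 := by omega
    rw [hc, List.range_succ_eq_map]
    simp only [List.map_cons, List.map_map]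
    congr 1
    · simp
    · refine List.map_congr_left ?_
      intro k _
      simp [Function.comp, Nat.succ_eq_add_one]
      ring
  · rw [if_neg h2]
    have hc : ((b - a + 4 - 1) / 4).toNat = 1 := by omega
    rw [hc]
    simp

theorem pvRange4_shift (L : Int) :
    PySem.List.pyRange 5 L 4 = (PySem.List.pyRange 1 (L - 4) 4).map (fun x => x + 4) := by
  rw [PySem.List.pyRange_of_pos _ _ (by norm_num), PySem.List.pyRange_of_pos _ _ (by norm_num)]
  by_cases h5 : (5 : Int) < L
  · rw [if_pos h5, if_pos (by omega), List.map_map]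
    rw [show L - 5 + 4 - 1 = L - 4 - 1 + 4 - 1 by ring]
    refine List.map_congr_left ?_
    intro k _
    simp [Function.comp]
    ring
  · rw [if_neg h5, if_neg (by omega)]
    simp

theorem pvGetD_drop4 (cs : List Char) (i : Int) (hi : 0 ≤ i) (d : Char) :
    PySem.List.pyGetD cs (i + 4) d = PySem.List.pyGetD (cs.drop 4) i d := by
  obtain ⟨n, rfl⟩ : ∃ n : Nat, i = (n : Int) := ⟨i.toNat, (Int.toNat_of_nonneg hi).symm⟩
  rw [show (n : Int) + 4 = ((n + 4 : Nat) : Int) by omega,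
      PySem.List.pyGetD_natCast, PySem.List.pyGetD_natCast]
  simp [List.getD, List.getElem?_drop, Nat.add_comm]

theorem pvLength_step4 (l : List Char) : (pvStep4 l).length = (l.length + 3) / 4 := by
  induction l using pvStep4.induct with
  | case1 => simp [pvStep4]
  | case2 c rest ih =>
      simp only [pvStep4, List.length_cons, ih, List.length_drop]
      omega

-- Relating the two emitters: pvCanon's pending "]" is exactly what pvCanon2 has
-- already emitted, except at the boundary chunk.
theorem pvCanon_eq_canon2 (us : List (Char × Bool)) (prev : Bool) :
    pvCanon prev us
      = (if prev = true ∧ pvHead us = false then [']'] else []) ++ pvCanon2 prev us := by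
  induction us generalizing prev with
  | nil => cases prev <;> simp [pvCanon, pvCanon2, pvHead]
  | cons u us ih =>
      obtain ⟨b, d⟩ := u
      rw [pvCanon, pvCanon2, ih d]
      cases prev <;> cases d <;> simp [pvHead]

-- A's fold over range(1, len, 4) computes pvCanon over the unit list.
theorem pvAloop (n : Nat) : ∀ (cs : List Char), cs.length = n → cs.length % 4 ≠ 2 →
    ∀ (prev : Bool) (lab : List Char),
    pvFinish ((PySem.List.pyRange 1 (cs.length : Int) 4).foldl (pvAstep cs) (prev, lab))
      = lab ++ pvCanon prev (pvUnits cs) := by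
  induction n using Nat.strong_induction_on with
  | _ n ih =>
    intro cs hn hmod prev lab
    match cs, hn with
    | [], hn =>
        rw [pvRange4_nil 1 _ (by simp)]
        cases prev <;> simp [pvUnits, pvStep4, pvCanon, pvFinish]
    | [c0], hn =>
        rw [pvRange4_nil 1 _ (by simp)]
        cases prev <;> simp [pvUnits, pvStep4, pvCanon, pvFinish]
    | [c0, c1], hn => simp at hmod
    | c0 :: c1 :: c2 :: rest, hn =>
        have hread1 : PySem.List.pyGetD (c0 :: c1 :: c2 :: rest) 1 ' ' = c1 := by
          simp [PySem.List.pyGetD_ofNat']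
        have hread2 : PySem.List.pyGetD (c0 :: c1 :: c2 :: rest) 2 ' ' = c2 := by
          simp [PySem.List.pyGetD_ofNat']
        -- the remaining iterations are A's loop on cs.drop 4
        have hrest : ∀ st : Bool × List Char,
            ((PySem.List.pyRange 5 ((c0 :: c1 :: c2 :: rest).length : Int) 4).foldl
              (pvAstep (c0 :: c1 :: c2 :: rest)) st)
            = (PySem.List.pyRange 1 (((c0 :: c1 :: c2 :: rest).drop 4).length : Int) 4).foldl
              (pvAstep ((c0 :: c1 :: c2 :: rest).drop 4)) st := by
          intro st
          rw [pvRange4_shift, List.foldl_map]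
          have hbound : PySem.List.pyRange 1 (((c0 :: c1 :: c2 :: rest).length : Int) - 4) 4
              = PySem.List.pyRange 1 ((((c0 :: c1 :: c2 :: rest).drop 4).length : Nat) : Int) 4 := by
            by_cases h4 : 4 ≤ (c0 :: c1 :: c2 :: rest).length
            · congr 1
              simp only [List.length_cons, List.length_drop] at h4 ⊢
              omega
            · rw [pvRange4_nil _ _ (by simp only [List.length_cons] at h4 ⊢; omega),
                  pvRange4_nil _ _ (by
                    simp only [List.length_cons, List.length_drop] at h4 ⊢; omega)]
          rw [hbound]
          refine PySem.List.foldl_congr_mem _ _ _ _ ?_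
          intro acc x hx
          have hx1 : 1 ≤ x := ((PySem.List.mem_pyRange_iff_of_pos (by norm_num) x).mp hx).1
          unfold pvAstep
          rw [show x + 4 + 1 = (x + 1) + 4 by ring,
              pvGetD_drop4 _ _ (by omega), pvGetD_drop4 _ _ (by omega)]
        have hunits : pvUnits (c0 :: c1 :: c2 :: rest)
            = (c1, c2 == 'd') :: pvUnits ((c0 :: c1 :: c2 :: rest).drop 4) := by
          show pvUnits (c0 :: c1 :: c2 :: rest) = (c1, c2 == 'd') :: pvUnits (rest.drop 1)
          simp only [pvUnits, List.drop_succ_cons, List.drop_zero]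
          rw [show (c1 :: c2 :: rest) = c1 :: (c2 :: rest) from rfl, pvStep4, pvStep4]
          simp
        have hmod' : ((c0 :: c1 :: c2 :: rest).drop 4).length % 4 ≠ 2 := by
          simp only [List.length_drop, List.length_cons] at hmod ⊢
          omega
        have hlt : ((c0 :: c1 :: c2 :: rest).drop 4).length < n := by
          simp only [List.length_drop, List.length_cons] at hn ⊢
          omega
        have IH := ih _ hlt ((c0 :: c1 :: c2 :: rest).drop 4) rfl hmod'
        rw [pvRange4_cons 1 _ (by simp; omega), List.foldl_cons,
            show (1 : Int) + 4 = 5 by norm_num, hrest, hunits]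
        by_cases hd : c2 = 'd' <;> cases prev <;>
          have hbd : (c2 == 'd') = (if c2 = 'd' then true else false) := by
            by_cases h : c2 = 'd' <;> simp [h]
        · -- DNA unit, bracket closed: open it
          rw [show pvAstep (c0 :: c1 :: c2 :: rest) (false, lab) 1
                = (true, lab ++ ['['] ++ [c1]) from by
              simp only [pvAstep, show (1 : Int) + 1 = 2 by norm_num, hread1, hread2]
              simp [hd]]
          rw [IH true (lab ++ ['['] ++ [c1])]
          rw [hbd, if_pos hd]; simp [pvCanon, List.append_assoc]
        · -- DNA unit, bracket open: plain append
          rw [show pvAstep (c0 :: c1 :: c2 :: rest) (true, lab) 1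
                = (true, lab ++ [c1]) from by
              simp only [pvAstep, show (1 : Int) + 1 = 2 by norm_num, hread1, hread2]
              simp [hd]]
          rw [IH true (lab ++ [c1])]
          rw [hbd, if_pos hd]; simp [pvCanon, List.append_assoc]
        · -- RNA unit, bracket closed: plain append
          rw [show pvAstep (c0 :: c1 :: c2 :: rest) (false, lab) 1
                = (false, lab ++ [c1]) from by
              simp only [pvAstep, show (1 : Int) + 1 = 2 by norm_num, hread1, hread2]
              simp [hd]]
          rw [IH false (lab ++ [c1])]
          rw [hbd, if_neg hd]; simp [pvCanon, List.append_assoc]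
        · -- RNA unit, bracket open: close it
          rw [show pvAstep (c0 :: c1 :: c2 :: rest) (true, lab) 1
                = (false, lab ++ [']'] ++ [c1]) from by
              simp only [pvAstep, show (1 : Int) + 1 = 2 by norm_num, hread1, hread2]
              simp [hd]]
          rw [IH false (lab ++ [']'] ++ [c1])]
          rw [hbd, if_neg hd]; simp [pvCanon, List.append_assoc]

-- B's enumerate loop computes pvCanon2 over the unit list.
theorem pvBloop (flags : List Bool) (bs : List Char) : ∀ (k : Nat), k + bs.length = flags.length →
    (PySem.List.enumerate bs (k : Int)).flatMap (pvBchunk flags)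
    = pvCanon2 (if k = 0 then false else flags.getD (k - 1) false) (bs.zip (flags.drop k)) := by
  induction bs with
  | nil => intro k hk; simp [pvCanon2]
  | cons b bs ihb =>
      intro k hk
      have hklt : k < flags.length := by simp at hk; omega
      rw [PySem.List.enumerate_cons, List.flatMap_cons,
          List.drop_eq_getElem_cons hklt, List.zip_cons_cons, pvCanon2]
      have hcur : PySem.List.pyGetD flags (k : Int) false = flags[k] := by
        rw [PySem.List.pyGetD_natCast, List.getD_eq_getElem _ _ hklt]
      have hnext : PySem.List.pyGetD flags ((k : Int) + 1) false = flags.getD (k + 1) false := by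
        rw [show (k : Int) + 1 = ((k + 1 : Nat) : Int) by push_cast; ring,
            PySem.List.pyGetD_natCast]
      have hopen : (if PySem.List.pyGetD flags (k : Int) false = true ∧
            ((k : Int) = 0 ∨ PySem.List.pyGetD flags ((k : Int) - 1) false = false)
          then (['['] : List Char) else [])
          = (if flags[k] = true ∧ (if k = 0 then false else flags.getD (k - 1) false) = false
             then ['['] else []) := by
        rcases Nat.eq_zero_or_pos k with hk0 | hk0
        · subst hk0
          simp only [Nat.cast_zero] at hcur ⊢
          rw [hcur]
          simp
        · rw [hcur, show (k : Int) - 1 = ((k - 1 : Nat) : Int) by omega,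
              PySem.List.pyGetD_natCast, if_neg (by omega : ¬ k = 0)]
          refine if_congr (and_congr_right fun _ => ?_) rfl rfl
          constructor
          · rintro (h | h)
            · exact absurd h (by omega)
            · exact h
          · exact Or.inr
      have hclose : (if PySem.List.pyGetD flags (k : Int) false = true ∧
            ((k : Int) + 1 = (flags.length : Int) ∨
              PySem.List.pyGetD flags ((k : Int) + 1) false = false)
          then ([']'] : List Char) else [])
          = (if flags[k] = true ∧ pvHead (bs.zip (flags.drop (k + 1))) = false
             then [']'] else []) := by
        rcases bs with _ | ⟨b', bs'⟩
        · have hlen1 : (k : Int) + 1 = (flags.length : Int) := by simp at hk; omega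
          simp [hcur, hlen1, pvHead]
        · have hlt2 : k + 1 < flags.length := by simp at hk; omega
          have hne : ¬ ((k : Int) + 1 = (flags.length : Int)) := by omega
          rw [hcur, hnext, List.drop_eq_getElem_cons hlt2, List.getD_eq_getElem _ _ hlt2,
              List.zip_cons_cons]
          refine if_congr (and_congr_right fun _ => ?_) rfl rfl
          simp only [pvHead]
          constructor
          · rintro (h | h)
            · exact absurd h hne
            · exact h
          · exact Or.inr
      rw [show ∀ p, pvBchunk flags ((k : Int), b) ++ p
            = (if PySem.List.pyGetD flags (k : Int) false = true ∧
                  ((k : Int) = 0 ∨ PySem.List.pyGetD flags ((k : Int) - 1) false = false)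
               then (['['] : List Char) else []) ++ [b] ++
              (if PySem.List.pyGetD flags (k : Int) false = true ∧
                  ((k : Int) + 1 = (flags.length : Int) ∨
                    PySem.List.pyGetD flags ((k : Int) + 1) false = false)
               then [']'] else []) ++ p
            from fun p => by simp [pvBchunk],
          hopen, hclose]
      have hrec : (PySem.List.enumerate bs ((k : Int) + 1)).flatMap (pvBchunk flags)
          = pvCanon2 flags[k] (bs.zip (flags.drop (k + 1))) := by
        rw [show (k : Int) + 1 = ((k + 1 : Nat) : Int) by push_cast; ring,
            ihb (k + 1) (by simp at hk ⊢; omega),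
            show (if k + 1 = 0 then false else flags.getD (k + 1 - 1) false) = flags[k] from by
              simp [List.getElem?_eq_getElem hklt]]
      rw [hrec]

-- ''.join over the per-position appends is a flatMap.
theorem pvJoin (l : List (Int × Char)) (g : Int × Char → List Char) :
    (l.foldl (fun out jb => out ++ [g jb]) []).flatten = l.flatMap g := by
  rw [PySem.List.foldl_append_eq_flatMap (fun jb => [g jb]), List.nil_append]
  induction l with
  | nil => simp
  | cons x l ih => simp [ih]

theorem pv_main (s : String) (hpre : s.toList.length % 4 ≠ 2) :
    generateshippinglabel s = generateshippinglabel_alt s := by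
  have hA : generateshippinglabel s
      = String.ofList (pvFinish ((PySem.List.pyRange 1 (s.toList.length : Int) 4).foldl
          (pvAstep s.toList) (false, []))) := rfl
  have hB : generateshippinglabel_alt s
      = String.ofList (((PySem.List.enumerate (pvStep4 (s.toList.drop 1)) 0).foldl
          (fun (out : List (List Char)) jb =>
            out ++ [pvBchunk ((pvStep4 (s.toList.drop 2)).map (fun c => c == 'd')) jb]) []).flatten) := rfl
  have hlenflags : (0 : Nat) + (pvStep4 (s.toList.drop 1)).length
      = ((pvStep4 (s.toList.drop 2)).map (fun c => c == 'd')).length := by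
    simp only [pvLength_step4, List.length_map, List.length_drop, Nat.zero_add]
    omega
  have hb2 := pvBloop ((pvStep4 (s.toList.drop 2)).map (fun c => c == 'd'))
      (pvStep4 (s.toList.drop 1)) 0 hlenflags
  simp only [Nat.cast_zero, List.drop_zero, if_true] at hb2
  rw [hA, hB, pvJoin, hb2, pvAloop s.toList.length s.toList rfl hpre false []]
  rw [pvCanon_eq_canon2]
  simp [pvUnits]

-- ===== VERDICT (by name: the statement is the Claim_ definition above) =====
theorem generateshippinglabel_spec : Claim_equal_generateshippinglabel := by
  intro s _ hpre
  exact pv_main s hpre
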